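-- pv_equiv track=rewrite | github.com/patrickmineault/programming-course | class21-22/example/slides_to_new_style.py | split_slides
-- ===== SOURCE A (Python) =====
-- def split_slides(text):
--     slides = []
--     latest_slide = ""
--     for line in text.split('\n'):
--         if line[:2] == '# ':
--             # This is a new slide
--             slides.append(latest_slide)
--             latest_slide = ""
--         latest_slide += line + "\n"
--     slides.append(latest_slide)
--     return slides[1:]
-- ===== SOURCE B (Python) =====
-- def split_slides(text):
--     def rec(ls):
--         # ls is empty or starts with a heading line
--         if not ls:
--             return []
--         j = 1
--         while j < len(ls) and ls[j][:2] != '# ':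
--             j += 1
--         return ['\n'.join(ls[:j]) + '\n'] + rec(ls[j:])
--     lines = text.split('\n')
--     k = 0
--     while k < len(lines) and lines[k][:2] != '# ':
--         k += 1
--     return rec(lines[k:])
-- ===== Notes on version B (the rewrite author's own statement) =====
-- stated objective: alternative
-- what changed: Replaces A's flush-on-heading string accumulator fold with a recursive descent that drops the pre-heading prefix and repeatedly splits off the span of lines up to the next heading, joining each span once.
import Mathlib
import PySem

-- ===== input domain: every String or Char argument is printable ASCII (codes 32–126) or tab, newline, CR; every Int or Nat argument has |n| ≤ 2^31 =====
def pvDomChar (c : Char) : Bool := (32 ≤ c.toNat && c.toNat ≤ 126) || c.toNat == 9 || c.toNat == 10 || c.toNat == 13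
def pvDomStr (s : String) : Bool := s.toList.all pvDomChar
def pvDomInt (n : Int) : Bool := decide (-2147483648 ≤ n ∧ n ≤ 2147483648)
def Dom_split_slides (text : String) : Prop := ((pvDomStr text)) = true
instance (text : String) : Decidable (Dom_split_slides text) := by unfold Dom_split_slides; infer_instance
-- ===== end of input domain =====

-- B replaces A's flush-on-heading accumulator fold with a recursive span-splitting descent; alternative decomposition, same cost.

-- line[:2] == '# '  (both Pythons test the slice this way)
def pvIsHead (line : String) : Bool := PySem.Str.slice line none (some 2) == "# "

-- ===== PORT A =====
-- the body of A's for loop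
def pvStep (st : List String × String) (line : String) : List String × String :=
  let st1 := if pvIsHead line then (st.1 ++ [st.2], "") else st
  (st1.1, st1.2 ++ line ++ "\n")

def split_slides (text : String) : List String :=
  let r := ((PySem.Str.split? text "\n").getD []).foldl pvStep ([], "")
  PySem.List.slice (r.1 ++ [r.2]) (some 1) none

-- ===== PORT B =====
-- the inner while loop of Source B's rec is ls.takeWhile / ls.dropWhile on 'not a heading'
def pvRec : List String → List String
  | [] => []
  | l :: ls =>
      (PySem.Str.join "\n" (l :: ls.takeWhile (fun x => !pvIsHead x)) ++ "\n")
        :: pvRec (ls.dropWhile (fun x => !pvIsHead x))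
termination_by ls => ls.length
decreasing_by
  simpa [Nat.lt_succ_iff] using List.length_dropWhile_le (fun x => !pvIsHead x) ls

def split_slides_alt (text : String) : List String :=
  pvRec (((PySem.Str.split? text "\n").getD []).dropWhile (fun x => !pvIsHead x))

-- ===== PRECONDITION & SPEC =====
def Spec_split_slides (text : String) (out : List String) : Prop := out = split_slides_alt text
instance (text : String) (out : List String) : Decidable (Spec_split_slides text out) := by unfold Spec_split_slides; infer_instance

-- ===== CLAIM (what is proved, stated in full; the proofs are below) =====
def Claim_equal_split_slides : Prop := ∀ (text : String), Dom_split_slides text → Spec_split_slides text (split_slides text)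

-- ===== LEMMAS AND PROOFS =====

-- A's accumulation of a span of lines, starting from acc
def pvRenderAcc (acc : String) (g : List String) : String :=
  g.foldl (fun a l => a ++ l ++ "\n") acc

theorem pv_join_singleton (l : String) : PySem.Str.join "\n" [l] = l := by
  apply String.toList_inj.mp
  simp [PySem.Str.toList_join, PySem.Chars.join, List.intercalate]

theorem pv_join_cons (l x : String) (g : List String) :
    PySem.Str.join "\n" (l :: x :: g) = l ++ "\n" ++ PySem.Str.join "\n" (x :: g) := by
  apply String.toList_inj.mp
  simp only [PySem.Str.toList_join, List.map_cons, String.toList_append]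
  rw [PySem.Chars.join_cons_cons]

theorem pv_join_absorb (p x : String) (g : List String) :
    PySem.Str.join "\n" ((p ++ "\n" ++ x) :: g) = p ++ "\n" ++ PySem.Str.join "\n" (x :: g) := by
  cases g with
  | nil => rw [pv_join_singleton, pv_join_singleton]
  | cons y g =>
    apply String.toList_inj.mp
    simp only [PySem.Str.toList_join, List.map_cons, String.toList_append]
    rw [PySem.Chars.join_cons_cons, PySem.Chars.join_cons_cons]
    simp [List.append_assoc]

theorem pv_renderAcc_join (g : List String) : ∀ l : String,
    pvRenderAcc (l ++ "\n") g = PySem.Str.join "\n" (l :: g) ++ "\n" := by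
  induction g with
  | nil =>
    intro l
    rw [pv_join_singleton]
    rfl
  | cons x g ih =>
    intro l
    have h1 : pvRenderAcc (l ++ "\n") (x :: g) = pvRenderAcc ((l ++ "\n" ++ x) ++ "\n") g := by
      simp [pvRenderAcc, String.append_assoc]
    rw [h1, ih (l ++ "\n" ++ x), pv_join_absorb, pv_join_cons]

theorem pv_key (lines : List String) : ∀ (slides : List String) (latest : String),
    (lines.foldl pvStep (slides, latest)).1 ++ [(lines.foldl pvStep (slides, latest)).2]
    = slides ++ [pvRenderAcc latest (lines.takeWhile (fun x => !pvIsHead x))]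
        ++ pvRec (lines.dropWhile (fun x => !pvIsHead x)) := by
  induction lines with
  | nil => intro slides latest; simp [pvRenderAcc, pvRec]
  | cons l ls ih =>
    intro slides latest
    by_cases h : pvIsHead l = true
    · simp only [List.foldl_cons, List.takeWhile_cons, List.dropWhile_cons, h,
        Bool.not_true, Bool.false_eq_true, if_false]
      have hstep : pvStep (slides, latest) l = (slides ++ [latest], "" ++ l ++ "\n") := by
        simp [pvStep, h]
      rw [hstep, ih (slides ++ [latest]) ("" ++ l ++ "\n"), pvRec]
      rw [String.empty_append, pv_renderAcc_join]
      simp [pvRenderAcc]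
    · have hb : pvIsHead l = false := by simpa using h
      simp only [List.foldl_cons, List.takeWhile_cons, List.dropWhile_cons, hb,
        Bool.not_false]
      have hstep : pvStep (slides, latest) l = (slides, latest ++ l ++ "\n") := by
        simp [pvStep, hb]
      rw [hstep, ih slides (latest ++ l ++ "\n")]
      rfl

-- ===== VERDICT (by name: the statement is the Claim_ definition above) =====
theorem split_slides_spec : Claim_equal_split_slides := by
  intro text _
  show split_slides text = split_slides_alt text
  unfold split_slides split_slides_alt
  dsimp only
  rw [pv_key ((PySem.Str.split? text "\n").getD []) [] ""]
  rw [PySem.List.slice_from_one]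
  rfl
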